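-- pv_equiv track=rewrite | github.com/Fondamenti18/fondamenti-di-programmazione | students/1806198/homework03/program01.py | getmax_topsx
-- ===== SOURCE A (Python) =====
-- def getmax_topsx(himg,img,col,colonna_flag,lmax):
--
--     q=0; max_q=0; y=0
--
--     for riga in range(0,himg):
--
--         if img[riga][col] > 0:colonna_flag[riga] = 0
--         else:colonna_flag[riga] += 1
--
--         if colonna_flag[riga] > lmax:
--             q += 1
--             if q > max_q:
--                 max_q = q;  y=riga
--         else: q = 0
--
--     return max_q,y,colonna_flag
-- ===== SOURCE B (Python) =====
-- def getmax_topsx(himg, img, col, colonna_flag, lmax):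
--     # pass 1: refresh the per-row flag counters for this column (in place, like A)
--     for r in range(himg):
--         colonna_flag[r] = 0 if img[r][col] > 0 else colonna_flag[r] + 1
--     # pass 2: run lengths of consecutive rows whose counter exceeds lmax
--     runs = []
--     q = 0
--     for r in range(himg):
--         q = q + 1 if colonna_flag[r] > lmax else 0
--         runs.append(q)
--     max_q = max(runs, default=0)
--     y = runs.index(max_q) if max_q > 0 else 0
--     return max_q, y, colonna_flag
-- ===== Notes on version B (the rewrite author's own statement) =====
-- stated objective: alternative
-- what changed: A's single interleaved loop (flag update + best-run tracking) is split into a table-then-scan decomposition: one pass updates the flag counters, a second pass builds the run-length table, and max()/index() pick the longest run and the row where it is first reached.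
import Mathlib
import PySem

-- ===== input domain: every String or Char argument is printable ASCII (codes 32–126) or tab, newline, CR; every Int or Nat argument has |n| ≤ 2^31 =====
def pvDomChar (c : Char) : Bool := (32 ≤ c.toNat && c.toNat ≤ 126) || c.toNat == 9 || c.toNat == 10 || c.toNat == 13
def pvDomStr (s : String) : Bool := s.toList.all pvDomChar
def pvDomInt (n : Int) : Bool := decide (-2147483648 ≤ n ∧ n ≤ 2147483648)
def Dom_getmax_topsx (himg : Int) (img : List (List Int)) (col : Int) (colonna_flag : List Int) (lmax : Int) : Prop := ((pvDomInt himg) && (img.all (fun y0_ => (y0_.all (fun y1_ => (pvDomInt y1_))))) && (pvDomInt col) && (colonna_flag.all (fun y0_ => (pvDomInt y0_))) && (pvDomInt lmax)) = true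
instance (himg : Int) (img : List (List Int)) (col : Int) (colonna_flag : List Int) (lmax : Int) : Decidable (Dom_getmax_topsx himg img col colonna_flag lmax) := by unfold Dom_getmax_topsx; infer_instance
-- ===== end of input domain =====

-- B splits A's single interleaved loop into a table-then-scan decomposition: one pass
-- updates the flag counters in place, a second pass builds the run-length table, and
-- max/index pick the longest run and its first-reached row (objective: alternative).

-- ===== PORT A =====
-- the for-loop of A: state (q, max_q, y, colonna_flag); none = IndexError
def pvAGo (img : List (List Int)) (col lmax : Int) :
    List Int → Int → Int → Int → List Int → Option (Int × Int × List Int)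
  | [], _q, mq, y, flags => some (mq, y, flags)
  | riga :: rest, q, mq, y, flags =>
    match PySem.List.pyGet? img riga with
    | none => none
    | some row =>
      match PySem.List.pyGet? row col with
      | none => none
      | some pix =>
        match (if pix > 0 then PySem.List.pySet? flags riga 0
               else match PySem.List.pyGet? flags riga with
                    | none => none
                    | some c => PySem.List.pySet? flags riga (c + 1)) with
        | none => none
        | some flags' =>
          match PySem.List.pyGet? flags' riga with
          | none => none
          | some fv =>
            if fv > lmax then
              if q + 1 > mq then pvAGo img col lmax rest (q + 1) (q + 1) riga flags'
              else pvAGo img col lmax rest (q + 1) mq y flags'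
            else pvAGo img col lmax rest 0 mq y flags'

def getmax_topsx (himg : Int) (img : List (List Int)) (col : Int) (colonna_flag : List Int) (lmax : Int) : Int × Int × List Int :=
  match pvAGo img col lmax (PySem.List.pyRange 0 himg 1) 0 0 0 colonna_flag with
  | some r => r
  | none => (0, 0, colonna_flag)   -- IndexError in Python; outside Pre_

-- ===== PORT B =====
-- pass 1 of B: colonna_flag[r] = 0 if img[r][col] > 0 else colonna_flag[r] + 1
def pvBFlags (img : List (List Int)) (col : Int) : List Int → List Int → Option (List Int)
  | [], flags => some flags
  | r :: rest, flags =>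
    match PySem.List.pyGet? img r with
    | none => none
    | some row =>
      match PySem.List.pyGet? row col with
      | none => none
      | some pix =>
        match (if pix > 0 then some 0 else (PySem.List.pyGet? flags r).map (· + 1)) with
        | none => none
        | some v =>
          match PySem.List.pySet? flags r v with
          | none => none
          | some flags' => pvBFlags img col rest flags'

-- pass 2 of B: q = q + 1 if colonna_flag[r] > lmax else 0, appended for each r
def pvBRuns (flags : List Int) (lmax : Int) : List Int → Int → Option (List Int)
  | [], _ => some []
  | r :: rest, q =>
    match PySem.List.pyGet? flags r with
    | none => none
    | some f =>
      let q' := if f > lmax then q + 1 else 0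
      (pvBRuns flags lmax rest q').map (q' :: ·)

def getmax_topsx_alt (himg : Int) (img : List (List Int)) (col : Int) (colonna_flag : List Int) (lmax : Int) : Int × Int × List Int :=
  match pvBFlags img col (PySem.List.pyRange 0 himg 1) colonna_flag with
  | none => (0, 0, colonna_flag)   -- IndexError in Python; outside Pre_
  | some flags =>
    match pvBRuns flags lmax (PySem.List.pyRange 0 himg 1) 0 with
    | none => (0, 0, flags)        -- IndexError in Python; outside Pre_
    | some runs =>
      let max_q := match PySem.List.max? runs (fun x => x) with
                   | some m => m
                   | none => 0
      let y : Int := if max_q > 0 then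
                       match PySem.List.index? runs max_q with
                       | some j => (j : Int)
                       | none => 0
                     else 0
      (max_q, y, flags)

-- ===== PRECONDITION & SPEC =====
-- Pre_ excludes exactly the inputs where A raises IndexError: some riga < himg is out of
-- range of img or colonna_flag, or col is out of range of some row img[riga], riga < himg.
def Pre_getmax_topsx (himg : Int) (img : List (List Int)) (col : Int) (colonna_flag : List Int) (lmax : Int) : Prop :=
  himg ≤ (img.length : Int) ∧ himg ≤ (colonna_flag.length : Int) ∧
  ∀ row ∈ img.take himg.toNat, -((row.length : Int)) ≤ col ∧ col < (row.length : Int)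
instance (himg : Int) (img : List (List Int)) (col : Int) (colonna_flag : List Int) (lmax : Int) : Decidable (Pre_getmax_topsx himg img col colonna_flag lmax) := by unfold Pre_getmax_topsx; infer_instance

def pvWitness_getmax_topsx : Int × List (List Int) × Int × List Int × Int :=
  (2, [[0, 1], [5, 2]], 0, [3, 4, 7], 1)

def Spec_getmax_topsx (himg : Int) (img : List (List Int)) (col : Int) (colonna_flag : List Int) (lmax : Int) (out : Int × Int × List Int) : Prop := out = getmax_topsx_alt himg img col colonna_flag lmax
instance (himg : Int) (img : List (List Int)) (col : Int) (colonna_flag : List Int) (lmax : Int) (out : Int × Int × List Int) : Decidable (Spec_getmax_topsx himg img col colonna_flag lmax out) := by unfold Spec_getmax_topsx; infer_instance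

-- ===== CLAIM (what is proved, stated in full; the proofs are below) =====
def Claim_equal_getmax_topsx : Prop := ∀ (himg : Int) (img : List (List Int)) (col : Int) (colonna_flag : List Int) (lmax : Int), Dom_getmax_topsx himg img col colonna_flag lmax → Pre_getmax_topsx himg img col colonna_flag lmax → Spec_getmax_topsx himg img col colonna_flag lmax (getmax_topsx himg img col colonna_flag lmax)

-- ===== LEMMAS AND PROOFS =====

-- the value both programs store for colonna_flag[j], for j < himg in range
def pvFlagVal (img : List (List Int)) (col : Int) (cf : List Int) (j : Nat) : Int :=
  if 0 < PySem.List.pyGetD (img.getD j []) col 0 then 0 else cf.getD j 0 + 1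

-- the run-length sequence over the final flag values
def pvRuns (lmax : Int) : List Int → Int → List Int
  | [], _ => []
  | f :: fs, q =>
    let q' := if f > lmax then q + 1 else 0
    q' :: pvRuns lmax fs q'

-- A's run-tracking state machine over the final flag values, with riga counter i
def pvFoldA (lmax : Int) : List Int → Int → Int → Int → Int → Int × Int
  | [], _i, _q, mq, y => (mq, y)
  | f :: fs, i, q, mq, y =>
    if f > lmax then
      if q + 1 > mq then pvFoldA lmax fs (i + 1) (q + 1) (q + 1) i
      else pvFoldA lmax fs (i + 1) (q + 1) mq y
    else pvFoldA lmax fs (i + 1) 0 mq y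

-- best-so-far scan (strict improvement) over the run list
def pvFoldMax : List Int → Int → Int → Int → Int × Int
  | [], _i, mq, y => (mq, y)
  | r :: rs, i, mq, y =>
    if r > mq then pvFoldMax rs (i + 1) r i else pvFoldMax rs (i + 1) mq y

def pvListMax (mq : Int) (rs : List Int) : Int :=
  rs.foldl (fun a r => if r > a then r else a) mq

def pvFirstIdx : List Int → Int → Nat
  | [], _ => 0
  | r :: rs, v => if r = v then 0 else pvFirstIdx rs v + 1

theorem pvFoldA_eq_foldMax (lmax : Int) (fs : List Int) (i q mq y : Int) (hmq : 0 ≤ mq) :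
    pvFoldA lmax fs i q mq y = pvFoldMax (pvRuns lmax fs q) i mq y := by
  induction fs generalizing i q mq y with
  | nil => rfl
  | cons f fs ih =>
    simp only [pvFoldA, pvRuns, pvFoldMax]
    by_cases h : f > lmax
    · by_cases h2 : q + 1 > mq
      · simp only [if_pos h, if_pos h2]
        exact ih _ _ _ _ (by omega)
      · simp only [if_pos h, if_neg h2]
        exact ih _ _ _ _ hmq
    · have h0 : ¬ ((0:Int) > mq) := by omega
      simp only [if_neg h, if_neg h0]
      exact ih _ _ _ _ hmq

theorem pvListMax_le (mq : Int) (rs : List Int) : mq ≤ pvListMax mq rs := by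
  induction rs generalizing mq with
  | nil => simp [pvListMax]
  | cons r rs ih =>
    simp only [pvListMax, List.foldl] at *
    split
    · exact le_trans (by omega) (ih r)
    · exact ih mq

theorem pvListMax_cases (mq : Int) (rs : List Int) :
    pvListMax mq rs = mq ∨ pvListMax mq rs ∈ rs := by
  induction rs generalizing mq with
  | nil => simp [pvListMax]
  | cons r rs ih =>
    simp only [pvListMax, List.foldl] at *
    split
    · rcases ih r with h | h
      · right; simp [h]
      · right; simp [h]
    · rcases ih mq with h | h
      · left; exact h
      · right; simp [h]

theorem pvFoldMax_eq (rs : List Int) (i mq y : Int) :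
    pvFoldMax rs i mq y =
      (pvListMax mq rs,
       if mq < pvListMax mq rs then i + (pvFirstIdx rs (pvListMax mq rs) : Int) else y) := by
  induction rs generalizing i mq y with
  | nil => simp [pvFoldMax, pvListMax]
  | cons r rs ih =>
    have hM : pvListMax mq (r :: rs) = pvListMax (if r > mq then r else mq) rs := rfl
    simp only [pvFoldMax]
    by_cases h : r > mq
    · have hM2 : pvListMax mq (r :: rs) = pvListMax r rs := by rw [hM, if_pos h]
      rw [ih, hM2, if_pos h]
      have hlt : mq < pvListMax r rs := by
        have := pvListMax_le r rs; omega
      rw [if_pos hlt]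
      by_cases h2 : r < pvListMax r rs
      · have hne : r ≠ pvListMax r rs := by omega
        rw [if_pos h2]
        simp only [pvFirstIdx, if_neg hne]
        rw [Prod.mk.injEq]
        refine ⟨rfl, by push_cast; ring⟩
      · have heq : pvListMax r rs = r := le_antisymm (by omega) (pvListMax_le r rs)
        rw [if_neg h2]
        simp [pvFirstIdx, heq]
    · have hM2 : pvListMax mq (r :: rs) = pvListMax mq rs := by rw [hM, if_neg h]
      rw [if_neg h, ih, hM2]
      by_cases h2 : mq < pvListMax mq rs
      · have hne : r ≠ pvListMax mq rs := by omega
        rw [if_pos h2, if_pos h2]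
        simp only [pvFirstIdx, if_neg hne]
        rw [Prod.mk.injEq]
        refine ⟨rfl, by push_cast; ring⟩
      · rw [if_neg h2, if_neg h2]

theorem pvRuns_nonneg (lmax : Int) (fs : List Int) (q : Int) (hq : 0 ≤ q) :
    ∀ x ∈ pvRuns lmax fs q, 0 ≤ x := by
  induction fs generalizing q with
  | nil => simp [pvRuns]
  | cons f fs ih =>
    intro x hx
    simp only [pvRuns, List.mem_cons] at hx
    rcases hx with h | h
    · subst h; split <;> omega
    · exact ih _ (by split <;> omega) x h

theorem pvListMax_eq_foldl_max (mq : Int) (rs : List Int) :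
    pvListMax mq rs = rs.foldl max mq := by
  have hf : (fun (a r : Int) => if r > a then r else a) = max := by
    funext a r
    rw [max_def]
    by_cases h : r > a
    · rw [if_pos h, if_pos (by omega : a ≤ r)]
    · by_cases h2 : a ≤ r
      · rw [if_neg h, if_pos h2]; omega
      · rw [if_neg h, if_neg h2]
  rw [pvListMax, hf]

theorem pvFirstIdx_index? (rs : List Int) (v : Int) (hv : v ∈ rs) :
    PySem.List.index? rs v = some (pvFirstIdx rs v) := by
  induction rs with
  | nil => simp at hv
  | cons r rs ih =>
    by_cases h : r = v
    · subst h
      rw [PySem.List.index?_cons_self]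
      simp [pvFirstIdx]
    · have hv' : v ∈ rs := by rcases List.mem_cons.1 hv with h' | h' <;> [exact absurd h'.symm h; exact h']
      rw [PySem.List.index?_cons_of_ne (xs := rs) (x := r) (v := v) h, ih hv']
      simp [pvFirstIdx, h]

-- A's loop over final flag values F: invariant over the suffix starting at s
theorem pvAGo_eq (img : List (List Int)) (col lmax : Int) (cf : List Int) (n : Nat)
    (himgl : n ≤ img.length) (hcfl : n ≤ cf.length)
    (hcol : ∀ j : Nat, j < n → -(((img.getD j []).length : Int)) ≤ col ∧ col < ((img.getD j []).length : Int)) :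
    ∀ (t s : Nat), s + t = n → ∀ (q mq y : Int),
    pvAGo img col lmax ((List.range' s t).map (fun k : Nat => (k : Int))) q mq y
        (((List.range n).map (pvFlagVal img col cf)).take s ++ cf.drop s)
      = some ((pvFoldA lmax (((List.range n).map (pvFlagVal img col cf)).drop s) (s : Int) q mq y).1,
              (pvFoldA lmax (((List.range n).map (pvFlagVal img col cf)).drop s) (s : Int) q mq y).2,
              ((List.range n).map (pvFlagVal img col cf)) ++ cf.drop n) := by
  intro t
  induction t with
  | zero =>
    intro s hs q mq y
    have hs' : s = n := by omega
    have hlen : ((List.range n).map (pvFlagVal img col cf)).length = n := by simp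
    rw [hs']
    simp [pvAGo, pvFoldA, List.take_of_length_le (le_of_eq hlen),
          List.drop_eq_nil_of_le (le_of_eq hlen)]
  | succ t ih =>
    intro s hs q mq y
    have hsn : s < n := by omega
    set F := (List.range n).map (pvFlagVal img col cf) with hF
    have hFlen : F.length = n := by simp [hF]
    have hsF : s < F.length := by omega
    have hsimg : s < img.length := lt_of_lt_of_le hsn himgl
    have hscf : s < cf.length := lt_of_lt_of_le hsn hcfl
    have htlen : (F.take s).length = s := by simp; omega
    set flags := F.take s ++ cf.drop s with hflags
    have hrow : PySem.List.pyGet? img ((s : Nat) : Int) = some img[s] := by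
      rw [PySem.List.pyGet?_natCast, List.getElem?_eq_getElem hsimg]
    have hrowD : img.getD s [] = img[s] := List.getD_eq_getElem _ _ hsimg
    have hcols := hcol s hsn
    rw [hrowD] at hcols
    obtain ⟨pix, hpix⟩ : ∃ p, PySem.List.pyGet? img[s] col = some p := by
      rcases h : PySem.List.pyGet? img[s] col with _ | p
      · rw [PySem.List.pyGet?_eq_none_iff] at h
        exact absurd ⟨hcols.1, hcols.2⟩ h
      · exact ⟨p, rfl⟩
    have hpixD : PySem.List.pyGetD img[s] col 0 = pix := by
      simp [PySem.List.pyGetD, hpix]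
    have hFs : F[s] = if 0 < pix then 0 else cf[s] + 1 := by
      simp only [hF, List.getElem_map, List.getElem_range, pvFlagVal, hrowD, hpixD]
      rw [List.getD_eq_getElem _ _ hscf]
    have hgetf : PySem.List.pyGet? flags ((s : Nat) : Int) = some cf[s] := by
      rw [PySem.List.pyGet?_natCast, hflags,
          List.getElem?_append_right (by omega), htlen]
      simp [List.getElem?_drop, List.getElem?_eq_getElem hscf]
    have hsetv : ∀ v, flags.set s v = F.take s ++ v :: cf.drop (s + 1) := by
      intro v
      rw [hflags, List.set_append, if_neg (by rw [htlen]; omega), htlen, Nat.sub_self]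
      rw [List.drop_eq_getElem_cons hscf, List.set_cons_zero]
    have htake1 : F.take s ++ F[s] :: cf.drop (s + 1) = F.take (s + 1) ++ cf.drop (s + 1) := by
      rw [← List.take_concat_get hsF, List.concat_eq_append, List.append_assoc]
      simp
    have hstore :
        (if pix > 0 then PySem.List.pySet? flags ((s : Nat) : Int) 0
         else match PySem.List.pyGet? flags ((s : Nat) : Int) with
              | none => none
              | some c => PySem.List.pySet? flags ((s : Nat) : Int) (c + 1))
          = some (F.take (s + 1) ++ cf.drop (s + 1)) := by
      have hsl : s < flags.length := by
        rw [hflags]; simp [htlen]; omega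
      by_cases hp : pix > 0
      · rw [if_pos hp, PySem.List.pySet?_natCast _ _ _ hsl, hsetv]
        rw [show (0 : Int) = F[s] from by rw [hFs, if_pos hp], htake1]
      · rw [if_neg hp, hgetf]
        show PySem.List.pySet? flags ((s : Nat) : Int) (cf[s] + 1) = _
        rw [PySem.List.pySet?_natCast _ _ _ hsl, hsetv,
            show cf[s] + 1 = F[s] from by rw [hFs, if_neg (by omega)], htake1]
    have hget' : PySem.List.pyGet? (F.take (s + 1) ++ cf.drop (s + 1)) ((s : Nat) : Int)
        = some F[s] := by
      rw [PySem.List.pyGet?_natCast,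
          List.getElem?_append_left (by simp; omega)]
      rw [List.getElem?_take_of_lt (by omega), List.getElem?_eq_getElem hsF]
    have hdropF : F.drop s = F[s] :: F.drop (s + 1) := List.drop_eq_getElem_cons hsF
    have hrange : (List.range' s (t + 1)).map (fun k : Nat => (k : Int))
        = ((s : Nat) : Int) :: (List.range' (s + 1) t).map (fun k : Nat => (k : Int)) := by
      rw [List.range'_succ]; rfl
    have hcast : (((s + 1 : Nat) : Nat) : Int) = ((s : Nat) : Int) + 1 := by push_cast; ring
    rw [hrange]
    simp only [pvAGo, hrow, hpix, hstore, hget', hdropF, pvFoldA]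
    by_cases hb : F[s] > lmax
    · simp only [if_pos hb]
      by_cases hq : q + 1 > mq
      · simp only [if_pos hq]
        have := ih (s + 1) (by omega) (q + 1) (q + 1) ((s : Nat) : Int)
        rw [hcast] at this
        exact this
      · simp only [if_neg hq]
        have := ih (s + 1) (by omega) (q + 1) mq y
        rw [hcast] at this
        exact this
    · simp only [if_neg hb]
      have := ih (s + 1) (by omega) 0 mq y
      rw [hcast] at this
      exact this

-- B's pass 1 builds the same final flag list F ++ cf.drop n, suffix by suffix
theorem pvBFlags_eq (img : List (List Int)) (col : Int) (cf : List Int) (n : Nat)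
    (himgl : n ≤ img.length) (hcfl : n ≤ cf.length)
    (hcol : ∀ j : Nat, j < n → -(((img.getD j []).length : Int)) ≤ col ∧ col < ((img.getD j []).length : Int)) :
    ∀ (t s : Nat), s + t = n →
    pvBFlags img col ((List.range' s t).map (fun k : Nat => (k : Int)))
        (((List.range n).map (pvFlagVal img col cf)).take s ++ cf.drop s)
      = some (((List.range n).map (pvFlagVal img col cf)) ++ cf.drop n) := by
  intro t
  induction t with
  | zero =>
    intro s hs
    have hs' : s = n := by omega
    have hlen : ((List.range n).map (pvFlagVal img col cf)).length = n := by simp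
    rw [hs']
    simp [pvBFlags, List.take_of_length_le (le_of_eq hlen)]
  | succ t ih =>
    intro s hs
    have hsn : s < n := by omega
    set F := (List.range n).map (pvFlagVal img col cf) with hF
    have hFlen : F.length = n := by simp [hF]
    have hsF : s < F.length := by omega
    have hsimg : s < img.length := lt_of_lt_of_le hsn himgl
    have hscf : s < cf.length := lt_of_lt_of_le hsn hcfl
    have htlen : (F.take s).length = s := by simp; omega
    set flags := F.take s ++ cf.drop s with hflags
    have hrow : PySem.List.pyGet? img ((s : Nat) : Int) = some img[s] := by
      rw [PySem.List.pyGet?_natCast, List.getElem?_eq_getElem hsimg]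
    have hrowD : img.getD s [] = img[s] := List.getD_eq_getElem _ _ hsimg
    have hcols := hcol s hsn
    rw [hrowD] at hcols
    obtain ⟨pix, hpix⟩ : ∃ p, PySem.List.pyGet? img[s] col = some p := by
      rcases h : PySem.List.pyGet? img[s] col with _ | p
      · rw [PySem.List.pyGet?_eq_none_iff] at h
        exact absurd ⟨hcols.1, hcols.2⟩ h
      · exact ⟨p, rfl⟩
    have hpixD : PySem.List.pyGetD img[s] col 0 = pix := by
      simp [PySem.List.pyGetD, hpix]
    have hFs : F[s] = if 0 < pix then 0 else cf[s] + 1 := by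
      simp only [hF, List.getElem_map, List.getElem_range, pvFlagVal, hrowD, hpixD]
      rw [List.getD_eq_getElem _ _ hscf]
    have hgetf : PySem.List.pyGet? flags ((s : Nat) : Int) = some cf[s] := by
      rw [PySem.List.pyGet?_natCast, hflags,
          List.getElem?_append_right (by omega), htlen]
      simp [List.getElem?_drop, List.getElem?_eq_getElem hscf]
    have hsetv : ∀ v, flags.set s v = F.take s ++ v :: cf.drop (s + 1) := by
      intro v
      rw [hflags, List.set_append, if_neg (by rw [htlen]; omega), htlen, Nat.sub_self]
      rw [List.drop_eq_getElem_cons hscf, List.set_cons_zero]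
    have htake1 : F.take s ++ F[s] :: cf.drop (s + 1) = F.take (s + 1) ++ cf.drop (s + 1) := by
      rw [← List.take_concat_get hsF, List.concat_eq_append, List.append_assoc]
      simp
    have hval : (if pix > 0 then some 0 else (PySem.List.pyGet? flags ((s : Nat) : Int)).map (· + 1))
        = some F[s] := by
      by_cases hp : pix > 0
      · rw [if_pos hp, hFs, if_pos hp]
      · rw [if_neg hp, hgetf, hFs, if_neg (by omega)]; rfl
    have hsl : s < flags.length := by
      rw [hflags]; simp [htlen]; omega
    have hset : PySem.List.pySet? flags ((s : Nat) : Int) F[s]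
        = some (F.take (s + 1) ++ cf.drop (s + 1)) := by
      rw [PySem.List.pySet?_natCast _ _ _ hsl, hsetv, htake1]
    have hrange : (List.range' s (t + 1)).map (fun k : Nat => (k : Int))
        = ((s : Nat) : Int) :: (List.range' (s + 1) t).map (fun k : Nat => (k : Int)) := by
      rw [List.range'_succ]; rfl
    rw [hrange]
    simp only [pvBFlags, hrow, hpix, hval, hset]
    exact ih (s + 1) (by omega)

-- B's pass 2 over indices s..n-1 of F ++ tail reads off pvRuns of F.drop s
theorem pvBRuns_eq (F tail : List Int) (lmax : Int) (n : Nat) (hFlen : F.length = n) :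
    ∀ (t s : Nat), s + t = n → ∀ (q : Int),
    pvBRuns (F ++ tail) lmax ((List.range' s t).map (fun k : Nat => (k : Int))) q
      = some (pvRuns lmax (F.drop s) q) := by
  intro t
  induction t with
  | zero =>
    intro s hs q
    have hs' : s = n := by omega
    rw [hs', ← hFlen]
    simp [pvBRuns, pvRuns]
  | succ t ih =>
    intro s hs q
    have hsF : s < F.length := by omega
    have hget : PySem.List.pyGet? (F ++ tail) ((s : Nat) : Int) = some F[s] := by
      rw [PySem.List.pyGet?_natCast, List.getElem?_append_left hsF,
          List.getElem?_eq_getElem hsF]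
    have hrange : (List.range' s (t + 1)).map (fun k : Nat => (k : Int))
        = ((s : Nat) : Int) :: (List.range' (s + 1) t).map (fun k : Nat => (k : Int)) := by
      rw [List.range'_succ]; rfl
    have hdropF : F.drop s = F[s] :: F.drop (s + 1) := List.drop_eq_getElem_cons hsF
    rw [hrange]
    simp only [pvBRuns, hget, hdropF, pvRuns]
    rw [ih (s + 1) (by omega)]
    rfl

-- ===== VERDICT (by name: the statement is the Claim_ definition above) =====
theorem getmax_topsx_spec : Claim_equal_getmax_topsx := by
  intro himg img col cf lmax _hdom hpre
  obtain ⟨h1, h2, h3⟩ := hpre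
  unfold Spec_getmax_topsx
  have hn1 : himg.toNat ≤ img.length := by omega
  have hn2 : himg.toNat ≤ cf.length := by omega
  have hcol : ∀ j : Nat, j < himg.toNat →
      -(((img.getD j []).length : Int)) ≤ col ∧ col < ((img.getD j []).length : Int) := by
    intro j hj
    have hjl : j < img.length := lt_of_lt_of_le hj hn1
    rw [List.getD_eq_getElem _ _ hjl]
    have hjt : j < (img.take himg.toNat).length := by simp; omega
    have hmem : img[j] ∈ img.take himg.toNat := by
      have := List.getElem_mem hjt
      rwa [List.getElem_take] at this
    exact h3 _ hmem
  have hrangeF : List.range himg.toNat = List.range' 0 himg.toNat := List.range_eq_range'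
  have hrange : PySem.List.pyRange 0 himg 1 = (List.range' 0 himg.toNat).map (fun k : Nat => (k : Int)) := by
    rw [PySem.List.pyRange_one]
    simp only [Int.sub_zero]
    rw [hrangeF]
    simp
  have hA := pvAGo_eq img col lmax cf himg.toNat hn1 hn2 hcol himg.toNat 0 (by omega) 0 0 0
  simp only [List.take_zero, List.drop_zero, List.nil_append, Nat.cast_zero] at hA
  have hB1 := pvBFlags_eq img col cf himg.toNat hn1 hn2 hcol himg.toNat 0 (by omega)
  simp only [List.take_zero, List.drop_zero, List.nil_append] at hB1
  have hB2 := pvBRuns_eq ((List.range himg.toNat).map (pvFlagVal img col cf)) (cf.drop himg.toNat)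
      lmax himg.toNat (by simp) himg.toNat 0 (by omega) 0
  simp only [List.drop_zero] at hB2
  unfold getmax_topsx getmax_topsx_alt
  rw [hrange, hA, hB1]
  dsimp only
  rw [hB2]
  dsimp only
  set F := (List.range himg.toNat).map (pvFlagVal img col cf) with hF
  have hFlen : F.length = himg.toNat := by simp [hF]
  set runs := pvRuns lmax F 0 with hruns
  have hfold : pvFoldA lmax F 0 0 0 0 = pvFoldMax runs 0 0 0 :=
    pvFoldA_eq_foldMax lmax F 0 0 0 0 le_rfl
  have hmax : pvFoldMax runs 0 0 0 =
      (pvListMax 0 runs, if 0 < pvListMax 0 runs then (0 : Int) + (pvFirstIdx runs (pvListMax 0 runs) : Int) else 0) :=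
    pvFoldMax_eq runs 0 0 0
  have hnonneg : ∀ x ∈ runs, (0 : Int) ≤ x := pvRuns_nonneg lmax F 0 le_rfl
  have hMB : (match PySem.List.max? runs (fun x => x) with
              | some m => m
              | none => 0) = pvListMax 0 runs := by
    rcases hr : runs with _ | ⟨r, t⟩
    · simp [(PySem.List.max?_eq_none_iff _ _).2 rfl, pvListMax]
    · rw [PySem.List.max?_id_cons]
      have h0r : (0 : Int) ≤ r := hnonneg r (by rw [hr]; exact List.mem_cons_self)
      rw [pvListMax_eq_foldl_max]
      simp [List.foldl, max_eq_right h0r]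
  rw [hfold, hmax, hMB]
  set M := pvListMax 0 runs with hM
  by_cases hMpos : 0 < M
  · have hmem : M ∈ runs := by
      rcases pvListMax_cases 0 runs with h | h
      · omega
      · exact h
    rw [if_pos hMpos, if_pos (show M > 0 from hMpos), pvFirstIdx_index? runs M hmem]
    simp
  · rw [if_neg hMpos, if_neg (show ¬ M > 0 from hMpos)]
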